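-- pv_equiv track=rewrite | github.com/zs-fekete/project_MTrec | Script/seqhandlers.py | opposite_snps
-- ===== SOURCE A (Python) =====
-- def opposite_snps(opposite, readdic):
--     """Called snps that are actually in the ref type"""
--     for pos, base in readdic.items():
--         if pos in opposite:
--             if readdic[pos] == "A":
--                 readdic[pos]= "B"
--             else:
--                 readdic[pos] = "A"
--
--     return(readdic)
-- ===== SOURCE B (Python) =====
-- def opposite_snps(opposite, readdic):
--     """Called snps that are actually in the ref type"""
--     keys = sorted(readdic)
--     opp = sorted(set(opposite))
--     toflip = []
--     i = j = 0
--     while i < len(keys) and j < len(opp):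
--         if keys[i] < opp[j]:
--             i += 1
--         elif opp[j] < keys[i]:
--             j += 1
--         else:
--             toflip.append(keys[i])
--             i += 1
--             j += 1
--     for pos in toflip:
--         readdic[pos] = "B" if readdic[pos] == "A" else "A"
--     return readdic
-- ===== Notes on version B (the rewrite author's own statement) =====
-- stated objective: alternative
-- what changed: Instead of scanning the list `opposite` once per dict entry, B sorts the dict keys and the deduplicated positions and computes the set of positions to flip with a two-pointer merge intersection, then flips exactly those entries; it trades the per-entry membership scan for two sorts and a merge.
import Mathlib
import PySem

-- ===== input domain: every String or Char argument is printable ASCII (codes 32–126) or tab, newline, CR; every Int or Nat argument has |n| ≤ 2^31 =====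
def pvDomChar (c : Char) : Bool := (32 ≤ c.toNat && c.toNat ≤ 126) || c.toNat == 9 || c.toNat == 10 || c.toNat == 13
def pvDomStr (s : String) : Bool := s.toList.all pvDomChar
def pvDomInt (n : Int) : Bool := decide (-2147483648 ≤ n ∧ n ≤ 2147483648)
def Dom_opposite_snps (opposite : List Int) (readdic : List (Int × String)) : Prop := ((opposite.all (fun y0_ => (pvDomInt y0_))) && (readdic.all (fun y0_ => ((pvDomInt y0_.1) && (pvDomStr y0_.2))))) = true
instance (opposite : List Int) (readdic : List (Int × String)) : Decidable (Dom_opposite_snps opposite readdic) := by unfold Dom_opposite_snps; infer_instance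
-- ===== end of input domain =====

-- B computes the positions to flip by sorting the keys and the deduplicated positions and merge-
-- intersecting them with two pointers (no per-entry membership scan), then flips exactly those
-- entries in readdic (B mutates readdic in place, as A does).


-- ===== PORT A =====
-- for pos, base in readdic.items(): if pos in opposite: flip readdic[pos].
-- readdic[pos] is read with getD _ "": pos is always a key (it comes from items()), so the
-- default is never reached on inputs with distinct keys (guaranteed by Pre_).
def opposite_snps (opposite : List Int) (readdic : List (Int × String)) : List (Int × String) :=
  (readdic.foldl
    (fun (d : PySem.Dict Int String) pb =>
      if opposite.contains pb.1 then
        (if d.getD pb.1 "" = "A" then d.insert pb.1 "B" else d.insert pb.1 "A")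
      else d)
    (PySem.Dict.mk readdic)).items

-- ===== PORT B =====
-- the two-pointer while loop of Source B: state = the two remaining (sorted) suffixes
def pvMergeInter : List Int → List Int → List Int
  | [], _ => []
  | _ :: _, [] => []
  | a :: as, b :: bs =>
    if a < b then pvMergeInter as (b :: bs)
    else if b < a then pvMergeInter (a :: as) bs
    else a :: pvMergeInter as bs
termination_by l1 l2 => l1.length + l2.length

-- keys = sorted(readdic); opp = sorted(set(opposite)); toflip = merge-intersection;
-- then for pos in toflip: readdic[pos] = "B" if readdic[pos] == "A" else "A"
def opposite_snps_alt (opposite : List Int) (readdic : List (Int × String)) : List (Int × String) :=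
  let keys := PySem.List.sorted (readdic.map Prod.fst) (fun x => x) false
  let opp := PySem.List.sorted (PySem.Set.ofList opposite) (fun x => x) false
  let toflip := pvMergeInter keys opp
  (toflip.foldl
    (fun (d : PySem.Dict Int String) pos =>
      d.insert pos (if d.getD pos "" = "A" then "B" else "A"))
    (PySem.Dict.mk readdic)).items

-- ===== PRECONDITION & SPEC =====
-- readdic is a Python dict, whose keys are necessarily distinct: association lists with duplicate
-- keys correspond to no Python input, so they are excluded (on them A's loop would revisit a key
-- while B touches each distinct position once).
def Pre_opposite_snps (opposite : List Int) (readdic : List (Int × String)) : Prop :=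
  (readdic.map Prod.fst).Nodup
instance (opposite : List Int) (readdic : List (Int × String)) : Decidable (Pre_opposite_snps opposite readdic) := by unfold Pre_opposite_snps; infer_instance
def pvWitness_opposite_snps : List Int × (List (Int × String)) := ([3, 5], [(1, "A"), (3, "B"), (4, "A")])
def Spec_opposite_snps (opposite : List Int) (readdic : List (Int × String)) (out : List (Int × String)) : Prop := out = opposite_snps_alt opposite readdic
instance (opposite : List Int) (readdic : List (Int × String)) (out : List (Int × String)) : Decidable (Spec_opposite_snps opposite readdic out) := by unfold Spec_opposite_snps; infer_instance

-- ===== CLAIM (what is proved, stated in full; the proofs are below) =====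
def Claim_equal_opposite_snps : Prop := ∀ (opposite : List Int) (readdic : List (Int × String)), Dom_opposite_snps opposite readdic → Pre_opposite_snps opposite readdic → Spec_opposite_snps opposite readdic (opposite_snps opposite readdic)

-- ===== LEMMAS AND PROOFS =====

/-- The base flip written by both loops. -/
def pvFlip (v : String) : String := if v = "A" then "B" else "A"

/-- Flipping the value stored at a present key rewrites the items list pointwise. -/
lemma flip_items (d : PySem.Dict Int String) (k : Int)
    (hnd : d.keys.Nodup) (hc : d.contains k = true) :
    (d.insert k (pvFlip (d.getD k ""))).items
      = d.items.map (fun p => if p.1 = k then (p.1, pvFlip p.2) else p) := by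
  rw [PySem.Dict.items_insert_of_contains d _ hc]
  refine List.map_congr_left ?_
  intro p hp
  by_cases h : p.1 = k
  · rw [if_pos (by simpa using h), if_pos h, ← h,
        PySem.Dict.getD_of_mem_items d (by simpa using hp) hnd ""]
  · rw [if_neg (by simpa using h), if_neg h]

/-- The merge intersection is a sublist of its left argument. -/
lemma pvMergeInter_sublist : ∀ (l1 l2 : List Int), (pvMergeInter l1 l2).Sublist l1 := by
  intro l1 l2
  induction l1, l2 using pvMergeInter.induct with
  | case1 l2 => simp [pvMergeInter]
  | case2 a as => simp [pvMergeInter]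
  | case3 a as b bs h ih =>
    rw [pvMergeInter, if_pos h]
    exact ih.cons a
  | case4 a as b bs h1 h2 ih =>
    rw [pvMergeInter, if_neg h1, if_pos h2]
    exact ih
  | case5 a as b bs h1 h2 ih =>
    rw [pvMergeInter, if_neg h1, if_neg h2]
    exact ih.cons₂ a

/-- On strictly increasing lists the merge intersection is exactly the common elements. -/
lemma pvMergeInter_mem : ∀ (l1 l2 : List Int), l1.Pairwise (· < ·) → l2.Pairwise (· < ·) →
    ∀ x, x ∈ pvMergeInter l1 l2 ↔ x ∈ l1 ∧ x ∈ l2 := by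
  intro l1 l2
  induction l1, l2 using pvMergeInter.induct with
  | case1 l2 => intro _ _ x; simp [pvMergeInter]
  | case2 a as => intro _ _ x; simp [pvMergeInter]
  | case3 a as b bs h ih =>
    intro h1 h2 x
    rw [pvMergeInter, if_pos h, ih (List.Pairwise.of_cons h1) h2 x]
    constructor
    · rintro ⟨hx1, hx2⟩; exact ⟨List.mem_cons_of_mem _ hx1, hx2⟩
    · rintro ⟨hx1, hx2⟩
      rcases List.mem_cons.mp hx1 with rfl | hx1'
      · exfalso
        rcases List.mem_cons.mp hx2 with rfl | hx2'
        · omega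
        · have := (List.pairwise_cons.mp h2).1 x hx2'
          omega
      · exact ⟨hx1', hx2⟩
  | case4 a as b bs h1 h2 ih =>
    intro hp1 hp2 x
    rw [pvMergeInter, if_neg h1, if_pos h2, ih hp1 (List.Pairwise.of_cons hp2) x]
    constructor
    · rintro ⟨hx1, hx2⟩; exact ⟨hx1, List.mem_cons_of_mem _ hx2⟩
    · rintro ⟨hx1, hx2⟩
      rcases List.mem_cons.mp hx2 with rfl | hx2'
      · exfalso
        rcases List.mem_cons.mp hx1 with rfl | hx1'
        · omega
        · have := (List.pairwise_cons.mp hp1).1 x hx1'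
          omega
      · exact ⟨hx1, hx2'⟩
  | case5 a as b bs h1 h2 ih =>
    intro hp1 hp2 x
    have hab : a = b := by omega
    rw [pvMergeInter, if_neg h1, if_neg h2]
    simp only [List.mem_cons, ih (List.Pairwise.of_cons hp1) (List.Pairwise.of_cons hp2) x]
    constructor
    · rintro (rfl | ⟨hx1, hx2⟩)
      · exact ⟨Or.inl rfl, Or.inl hab⟩
      · exact ⟨Or.inr hx1, Or.inr hx2⟩
    · rintro ⟨rfl | hx1, hx2⟩
      · exact Or.inl rfl
      · rcases hx2 with rfl | hx2'
        · exfalso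
          have := (List.pairwise_cons.mp hp1).1 x hx1
          omega
        · exact Or.inr ⟨hx1, hx2'⟩

/-- A's loop over the items of an arbitrary dict, with distinct keys all present in d. -/
lemma A_loop (opposite : List Int) (l : List (Int × String)) :
    ∀ (d : PySem.Dict Int String), d.keys.Nodup → (l.map Prod.fst).Nodup →
    (∀ p ∈ l, d.contains p.1 = true) →
    (l.foldl
      (fun (d : PySem.Dict Int String) pb =>
        if opposite.contains pb.1 then
          (if d.getD pb.1 "" = "A" then d.insert pb.1 "B" else d.insert pb.1 "A")
        else d) d).items
    = d.items.map (fun p =>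
        if p.1 ∈ l.map Prod.fst ∧ p.1 ∈ opposite then (p.1, pvFlip p.2) else p) := by
  induction l with
  | nil => intro d _ _ _; simp
  | cons hd t ih =>
    intro d hnd hkl hmem
    simp only [List.foldl_cons]
    have hchd : d.contains hd.1 = true := hmem hd (List.mem_cons_self)
    have hkt : (t.map Prod.fst).Nodup := (List.nodup_cons.mp (by simpa using hkl)).2
    have hhdnot : hd.1 ∉ t.map Prod.fst := (List.nodup_cons.mp (by simpa using hkl)).1
    by_cases hop : opposite.contains hd.1 = true
    · rw [if_pos hop]
      have hmop : hd.1 ∈ opposite := by simpa using hop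
      have hd'eq : (if d.getD hd.1 "" = "A" then d.insert hd.1 "B" else d.insert hd.1 "A")
          = d.insert hd.1 (pvFlip (d.getD hd.1 "")) := by
        rw [pvFlip]; split_ifs <;> rfl
      rw [hd'eq]
      have hkeys : (d.insert hd.1 (pvFlip (d.getD hd.1 ""))).keys = d.keys :=
        PySem.Dict.keys_insert_of_contains d _ hchd
      have hmem' : ∀ p ∈ t, (d.insert hd.1 (pvFlip (d.getD hd.1 ""))).contains p.1 = true := by
        intro p hp
        have := hmem p (List.mem_cons_of_mem _ hp)
        rw [PySem.Dict.contains_iff_mem_keys] at this ⊢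
        rw [hkeys]; exact this
      rw [ih _ (by rw [hkeys]; exact hnd) hkt hmem', flip_items d hd.1 hnd hchd, List.map_map]
      refine List.map_congr_left ?_
      intro p hp
      by_cases h : p.1 = hd.1
      · simp only [Function.comp_apply]
        rw [if_pos h,
            if_neg (fun hco => hhdnot (h ▸ hco.1) :
              ¬((p.1, pvFlip p.2).1 ∈ t.map Prod.fst ∧ (p.1, pvFlip p.2).1 ∈ opposite)),
            if_pos ⟨by rw [h]; exact List.mem_map_of_mem List.mem_cons_self, by rw [h]; exact hmop⟩]
      · simp only [Function.comp_apply]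
        rw [if_neg h]
        by_cases h2 : p.1 ∈ t.map Prod.fst ∧ p.1 ∈ opposite
        · rw [if_pos h2, if_pos ⟨by simp [h2.1], h2.2⟩]
        · rw [if_neg h2, if_neg (fun hco => h2 ⟨by
            rcases (by simpa using hco.1 : p.1 = hd.1 ∨ p.1 ∈ t.map Prod.fst) with h'' | h''
            · exact absurd h'' h
            · exact h'', hco.2⟩)]
    · rw [if_neg hop]
      have hmop : hd.1 ∉ opposite := fun hm => hop (List.elem_eq_true_of_mem hm)
      rw [ih d hnd hkt (fun p hp => hmem p (List.mem_cons_of_mem _ hp))]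
      refine List.map_congr_left ?_
      intro p hp
      by_cases h2 : p.1 ∈ t.map Prod.fst ∧ p.1 ∈ opposite
      · rw [if_pos h2, if_pos ⟨by simp [h2.1], h2.2⟩]
      · rw [if_neg h2, if_neg (fun hco => h2 ⟨by
          rcases (by simpa using hco.1 : p.1 = hd.1 ∨ p.1 ∈ t.map Prod.fst) with h'' | h''
          · exact absurd (h'' ▸ hco.2) hmop
          · exact h'', hco.2⟩)]

/-- B's flip loop over a duplicate-free list of positions that are all keys of d. -/
lemma B_loop (ps : List Int) :
    ∀ (d : PySem.Dict Int String), d.keys.Nodup → ps.Nodup →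
    (∀ k ∈ ps, d.contains k = true) →
    (ps.foldl
      (fun (d : PySem.Dict Int String) pos =>
        d.insert pos (if d.getD pos "" = "A" then "B" else "A")) d).items
    = d.items.map (fun p => if p.1 ∈ ps then (p.1, pvFlip p.2) else p) := by
  induction ps with
  | nil => intro d _ _ _; simp
  | cons k t ih =>
    intro d hnd hps hmem
    have hkt : t.Nodup := (List.nodup_cons.mp hps).2
    have hknt : k ∉ t := (List.nodup_cons.mp hps).1
    have hc : d.contains k = true := hmem k List.mem_cons_self
    simp only [List.foldl_cons]
    have hins : d.insert k (if d.getD k "" = "A" then "B" else "A")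
        = d.insert k (pvFlip (d.getD k "")) := by rw [pvFlip]
    have hkeys : (d.insert k (pvFlip (d.getD k ""))).keys = d.keys :=
      PySem.Dict.keys_insert_of_contains d _ hc
    have hmem' : ∀ x ∈ t, (d.insert k (pvFlip (d.getD k ""))).contains x = true := by
      intro x hx
      have := hmem x (List.mem_cons_of_mem _ hx)
      rw [PySem.Dict.contains_iff_mem_keys] at this ⊢
      rw [hkeys]; exact this
    rw [hins, ih _ (by rw [hkeys]; exact hnd) hkt hmem', flip_items d k hnd hc, List.map_map]
    refine List.map_congr_left ?_
    intro p hp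
    by_cases h : p.1 = k
    · simp only [Function.comp_apply]
      rw [if_pos h,
          if_neg (fun hm => hknt (h ▸ hm) : (p.1, pvFlip p.2).1 ∉ t),
          if_pos (by rw [h]; exact List.mem_cons_self)]
    · simp only [Function.comp_apply]
      rw [if_neg h]
      by_cases h2 : p.1 ∈ t
      · rw [if_pos h2, if_pos (List.mem_cons_of_mem _ h2)]
      · rw [if_neg h2, if_neg (fun hco => by
          rcases List.mem_cons.mp hco with h'' | h''
          · exact h h''
          · exact h2 h'')]

-- ===== VERDICT (by name: the statement is the Claim_ definition above) =====
theorem opposite_snps_spec : Claim_equal_opposite_snps := by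
  intro opposite readdic _ hpre
  unfold Spec_opposite_snps opposite_snps opposite_snps_alt
  have hnd : (PySem.Dict.mk readdic : PySem.Dict Int String).keys.Nodup := hpre
  have hitems : (PySem.Dict.mk readdic : PySem.Dict Int String).items = readdic := rfl
  set keys := PySem.List.sorted (readdic.map Prod.fst) (fun x => x) false with hkeysdef
  set opp := PySem.List.sorted (PySem.Set.ofList opposite) (fun x => x) false with hoppdef
  have hkeys_pw : keys.Pairwise (· < ·) := by
    have hle : keys.Pairwise (· ≤ ·) := by
      simpa using PySem.List.sorted_pairwise (readdic.map Prod.fst) (fun x => x)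
    have hne : keys.Nodup := (PySem.List.sorted_perm (readdic.map Prod.fst) (fun x => x) false).nodup_iff.mpr hpre
    exact (hle.and hne).imp (fun h => lt_of_le_of_ne h.1 h.2)
  have hopp_pw : opp.Pairwise (· < ·) := PySem.List.sorted_ofList_pairwise_lt opposite
  have hmem_keys : ∀ x, x ∈ keys ↔ x ∈ readdic.map Prod.fst := by
    intro x; rw [hkeysdef, PySem.List.mem_sorted]
  have hmem_opp : ∀ x, x ∈ opp ↔ x ∈ opposite := by
    intro x
    rw [hoppdef, PySem.List.mem_sorted, PySem.Set.mem_ofList]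
  have hflip_nd : (pvMergeInter keys opp).Nodup :=
    (pvMergeInter_sublist keys opp).nodup hkeys_pw.nodup
  have hmemflip : ∀ x, x ∈ pvMergeInter keys opp ↔ x ∈ readdic.map Prod.fst ∧ x ∈ opposite := by
    intro x
    rw [pvMergeInter_mem keys opp hkeys_pw hopp_pw x, hmem_keys, hmem_opp]
  rw [A_loop opposite readdic _ hnd hpre
        (fun p hp => by
          rw [PySem.Dict.contains_iff_mem_keys]
          exact PySem.Dict.mem_keys_of_mem_items _ (by simpa [hitems] using hp)),
      B_loop (pvMergeInter keys opp) _ hnd hflip_nd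
        (fun k hk => by
          rw [PySem.Dict.contains_iff_mem_keys]
          have := ((hmemflip k).mp hk).1
          simpa [PySem.Dict.keys, hitems] using this),
      hitems]
  refine List.map_congr_left ?_
  intro p hp
  by_cases h : p.1 ∈ readdic.map Prod.fst ∧ p.1 ∈ opposite
  · rw [if_pos h, if_pos ((hmemflip p.1).mpr h)]
  · rw [if_neg h, if_neg (fun hm => h ((hmemflip p.1).mp hm))]
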